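-- pv_equiv track=rewrite | github.com/goglesquirmintontheiii/cm2script | main.py | fetchct
-- ===== SOURCE A (Python) =====
-- def fetchct(txt):
--     txt = txt.strip()
--     if '[' in txt and ']' in txt:
--         otp = ''
--         targ = ''
--         br = False
--         for v in txt:
--             if v in '[]':
--                 br = not br
--             elif br:
--                 otp += v
--             else:
--                 targ += v
--         alt = False
--         if '.' in txt:
--             alt = ']' in txt.split('.')[0]
--         return int(otp.split(':')[0]), int(otp.split(':')[1]), alt, targ
--     else:
--         return -999, -999, False, txt
-- ===== SOURCE B (Python) =====
-- def fetchct(txt):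
--     txt = txt.strip()
--     if '[' in txt and ']' in txt:
--         tokens = txt.replace('[', ']').split(']')
--         targ = ''.join(tok for i, tok in enumerate(tokens) if i % 2 == 0)
--         otp = ''.join(tok for i, tok in enumerate(tokens) if i % 2 == 1)
--         alt = '.' in txt and ']' in txt.split('.')[0]
--         return int(otp.split(':')[0]), int(otp.split(':')[1]), alt, targ
--     else:
--         return -999, -999, False, txt
-- ===== Notes on version B (the rewrite author's own statement) =====
-- stated objective: idiomatic
-- what changed: The character-by-character loop with an in-bracket toggle flag is replaced by normalising '[' to ']' and splitting on ']': tokens at even positions are the outside-bracket text and tokens at odd positions the inside-bracket text, joined directly.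
import Mathlib
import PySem

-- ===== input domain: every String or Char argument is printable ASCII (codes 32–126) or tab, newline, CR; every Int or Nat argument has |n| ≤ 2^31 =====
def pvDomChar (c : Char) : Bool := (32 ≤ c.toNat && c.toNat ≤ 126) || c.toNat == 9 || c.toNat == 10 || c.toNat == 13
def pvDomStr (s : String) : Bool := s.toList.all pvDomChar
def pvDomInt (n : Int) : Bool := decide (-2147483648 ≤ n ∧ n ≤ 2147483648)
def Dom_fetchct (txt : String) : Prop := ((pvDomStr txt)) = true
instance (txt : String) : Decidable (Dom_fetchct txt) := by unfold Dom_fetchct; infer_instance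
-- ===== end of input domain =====

-- B replaces A's char-by-char toggle loop by normalising brackets and splitting: tokens at even
-- positions are outside text, tokens at odd positions are inside text (objective: idiomatic).

-- ===== PORT A =====
-- 'v in "[]"' is membership of a char in the two-char string, ported as the disjunction c = '[' ∨ c = ']' (exact).
def fetchctStep (st : List Char × List Char × Bool) (c : Char) : List Char × List Char × Bool :=
  if c = '[' ∨ c = ']' then (st.1, st.2.1, !st.2.2)
  else if st.2.2 then (st.1 ++ [c], st.2.1, st.2.2)
  else (st.1, st.2.1 ++ [c], st.2.2)

-- Where Python raises (no ':' in otp → IndexError, or int() → ValueError) the port returns the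
-- default (0, 0, false, ""); those inputs are excluded by Pre_fetchct.
def fetchct (txt : String) : Int × Int × Bool × String :=
  let t := (PySem.Str.strip txt).toList
  if PySem.Chars.isIn ['['] t && PySem.Chars.isIn [']'] t then
    let st := t.foldl fetchctStep ([], [], false)
    let otp := st.1
    let targ := st.2.1
    let alt := if PySem.Chars.isIn ['.'] t then
                 PySem.Chars.isIn [']'] ((PySem.Chars.splitOn t ['.']).headD [])
               else false
    match PySem.Int.ofChars? ((PySem.Chars.splitOn otp [':']).headD []),
          PySem.Int.ofChars? ((PySem.Chars.splitOn otp [':'])[1]?.getD []) with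
    | some a, some b => (a, b, alt, String.ofList targ)
    | _, _ => (0, 0, false, "")
  else (-999, -999, false, String.ofList t)

-- ===== PORT B =====
def fetchct_alt (txt : String) : Int × Int × Bool × String :=
  let t := (PySem.Str.strip txt).toList
  if PySem.Chars.isIn ['['] t && PySem.Chars.isIn [']'] t then
    let tokens := PySem.Chars.splitOn (PySem.Chars.replace t ['['] [']']) [']']
    let en := PySem.List.enumerate tokens 0
    let targ := PySem.Chars.join [] ((en.filter (fun p => p.1 % 2 == 0)).map Prod.snd)
    let otp := PySem.Chars.join [] ((en.filter (fun p => p.1 % 2 == 1)).map Prod.snd)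
    let alt := PySem.Chars.isIn ['.'] t &&
               PySem.Chars.isIn [']'] ((PySem.Chars.splitOn t ['.']).headD [])
    match PySem.Int.ofChars? ((PySem.Chars.splitOn otp [':']).headD []) with
    | none => (0, 0, false, "")
    | some a =>
      match PySem.Int.ofChars? ((PySem.Chars.splitOn otp [':'])[1]?.getD []) with
      | none => (0, 0, false, "")
      | some b => (a, b, alt, String.ofList targ)
  else (-999, -999, false, String.ofList t)

-- ===== PRECONDITION & SPEC =====
-- pvInner computes the text inside brackets (the minimal description of what A feeds to int());
-- it is used only to state Pre_ and by the proofs, never by the ports.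
def pvInner : Bool → List Char → List Char
  | _, [] => []
  | br, c :: cs =>
    if c = '[' ∨ c = ']' then pvInner (!br) cs
    else if br then c :: pvInner br cs else pvInner br cs

-- Pre_ excludes exactly the inputs on which Python A raises: when both brackets occur, the
-- in-bracket text must contain ':' with int()-parseable text on both sides (else IndexError/ValueError).
def Pre_fetchct (txt : String) : Prop :=
  (PySem.Chars.isIn ['['] (PySem.Str.strip txt).toList
     && PySem.Chars.isIn [']'] (PySem.Str.strip txt).toList) = true →
  ((PySem.Int.ofChars? ((PySem.Chars.splitOn (pvInner false (PySem.Str.strip txt).toList) [':']).headD [])).isSome ∧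
   (PySem.Int.ofChars? ((PySem.Chars.splitOn (pvInner false (PySem.Str.strip txt).toList) [':'])[1]?.getD [])).isSome)
instance (txt : String) : Decidable (Pre_fetchct txt) := by unfold Pre_fetchct; infer_instance

def pvWitness_fetchct : String := "[1:2]x"

def Spec_fetchct (txt : String) (out : Int × Int × Bool × String) : Prop := out = fetchct_alt txt
instance (txt : String) (out : Int × Int × Bool × String) : Decidable (Spec_fetchct txt out) := by
  unfold Spec_fetchct; infer_instance

-- ===== CLAIM (what is proved, stated in full; the proofs are below) =====
def Claim_equal_fetchct : Prop := ∀ (txt : String), Dom_fetchct txt → Pre_fetchct txt → Spec_fetchct txt (fetchct txt)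

-- ===== LEMMAS AND PROOFS =====

def pvBr (c : Char) : Char := if c = '[' then ']' else c

def pvOuter : Bool → List Char → List Char
  | _, [] => []
  | br, c :: cs =>
    if c = '[' ∨ c = ']' then pvOuter (!br) cs
    else if br then pvOuter br cs else c :: pvOuter br cs

def pvEnd : Bool → List Char → Bool
  | br, [] => br
  | br, c :: cs => if c = '[' ∨ c = ']' then pvEnd (!br) cs else pvEnd br cs

def pvSplit : List Char → List (List Char)
  | [] => [[]]
  | c :: cs => if c = ']' then [] :: pvSplit cs else (pvSplit cs).modifyHead (c :: ·)

def pvJ : Bool → List (List Char) → List Char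
  | _, [] => []
  | true, p :: ps => p ++ pvJ false ps
  | false, _ :: ps => pvJ true ps

theorem replace_go_eq (l : List Char) : ∀ (fuel : Nat) (acc : List Char), l.length ≤ fuel →
    PySem.Chars.replace.go ['['] [']'] fuel l acc = acc.reverse ++ l.map pvBr := by
  induction l with
  | nil => intro fuel acc h; cases fuel <;> simp [PySem.Chars.replace.go]
  | cons c rest ih =>
    intro fuel acc h
    simp only [List.length_cons] at h
    cases fuel with
    | zero => omega
    | succ f =>
      rw [PySem.Chars.replace.go]
      simp only [List.isPrefixOf, Bool.and_true]
      by_cases hc : c = '['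
      · rw [if_pos (by simp [hc]), show List.drop ['['].length (c :: rest) = rest from rfl,
           ih f _ (by omega)]
        simp [hc, pvBr]
      · rw [if_neg (by simp [Ne.symm hc]), ih f _ (by omega)]
        simp [pvBr, hc]

theorem replace_eq (cs : List Char) : PySem.Chars.replace cs ['['] [']'] = cs.map pvBr := by
  rw [PySem.Chars.replace]
  simpa using replace_go_eq cs cs.length [] le_rfl

theorem pvSplit_ne_nil (cs : List Char) : pvSplit cs ≠ [] := by
  induction cs with
  | nil => simp [pvSplit]
  | cons c cs ih =>
    simp only [pvSplit]; split
    · simp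
    · cases h : pvSplit cs with
      | nil => exact absurd h ih
      | cons p ps => simp [List.modifyHead]

theorem splitOn_go_eq (l : List Char) : ∀ (fuel : Nat) (cur : List Char) (acc : List (List Char)),
    l.length ≤ fuel →
    PySem.Chars.splitOn.go [']'] fuel l cur acc
      = acc.reverse ++ (pvSplit l).modifyHead (cur.reverse ++ ·) := by
  induction l with
  | nil =>
    intro fuel cur acc h
    cases fuel <;> simp [PySem.Chars.splitOn.go, pvSplit]
  | cons c rest ih =>
    intro fuel cur acc h
    simp only [List.length_cons] at h
    cases fuel with
    | zero => omega
    | succ f =>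
      rw [PySem.Chars.splitOn.go]
      simp only [List.isPrefixOf, Bool.and_true]
      by_cases hc : c = ']'
      · rw [if_pos (by simp [hc]), show List.drop [']'].length (c :: rest) = rest from rfl,
           ih f _ _ (by omega)]
        simp [pvSplit, hc]; cases pvSplit rest <;> simp
      · rw [if_neg (by simp [Ne.symm hc]), ih f _ _ (by omega)]
        simp only [pvSplit, if_neg hc]
        cases h2 : pvSplit rest with
        | nil => exact absurd h2 (pvSplit_ne_nil rest)
        | cons p ps => simp [List.modifyHead]

theorem splitOn_eq (cs : List Char) : PySem.Chars.splitOn cs [']'] = pvSplit cs := by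
  rw [PySem.Chars.splitOn]
  rw [splitOn_go_eq cs (cs.length + 1) [] [] (by omega)]
  simp; cases h : pvSplit cs <;> simp [List.modifyHead]

theorem loop_eq (cs : List Char) : ∀ (o t : List Char) (br : Bool),
    cs.foldl fetchctStep (o, t, br) = (o ++ pvInner br cs, t ++ pvOuter br cs, pvEnd br cs) := by
  induction cs with
  | nil => intro o t br; simp [pvInner, pvOuter, pvEnd]
  | cons c rest ih =>
    intro o t br
    by_cases hc : c = '[' ∨ c = ']'
    · simp [List.foldl_cons, fetchctStep, hc, ih, pvInner, pvOuter, pvEnd]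
    · cases br <;>
        simp [List.foldl_cons, fetchctStep, hc, ih, pvInner, pvOuter, pvEnd]

theorem innerOuter_eq (cs : List Char) : ∀ (br : Bool),
    pvInner br cs = pvJ br (pvSplit (cs.map pvBr))
      ∧ pvOuter br cs = pvJ (!br) (pvSplit (cs.map pvBr)) := by
  induction cs with
  | nil => intro br; cases br <;> simp [pvInner, pvOuter, pvSplit, pvJ]
  | cons c rest ih =>
    intro br
    by_cases hc : c = '[' ∨ c = ']'
    · have hb : pvBr c = ']' := by rcases hc with h | h <;> simp [pvBr, h]
      have h1 : pvSplit ((c :: rest).map pvBr) = [] :: pvSplit (rest.map pvBr) := by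
        simp [hb, pvSplit]
      rw [show pvInner br (c :: rest) = pvInner (!br) rest by simp [pvInner, hc],
          show pvOuter br (c :: rest) = pvOuter (!br) rest by simp [pvOuter, hc], h1]
      rcases ih (!br) with ⟨hi, ho⟩
      constructor
      · rw [hi]; cases br <;> simp [pvJ]
      · rw [ho]; cases br <;> simp [pvJ]
    · rw [not_or] at hc
      have hb : pvBr c = c := by simp [pvBr, hc.1]
      cases h2 : pvSplit (rest.map pvBr) with
      | nil => exact absurd h2 (pvSplit_ne_nil _)
      | cons p ps =>
        have h1 : pvSplit ((c :: rest).map pvBr) = (c :: p) :: ps := by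
          simp [hb, pvSplit, hc.2, h2, List.modifyHead]
        rcases ih br with ⟨hi, ho⟩
        rw [show pvInner br (c :: rest)
              = (if br then c :: pvInner br rest else pvInner br rest) by
              simp [pvInner, hc.1, hc.2],
            show pvOuter br (c :: rest)
              = (if br then pvOuter br rest else c :: pvOuter br rest) by
              simp [pvOuter, hc.1, hc.2], h1]
        rw [hi, ho, h2]
        cases br <;> simp [pvJ]

theorem pvJoinNil (l : List (List Char)) : PySem.Chars.join [] l = l.flatten := by
  induction l with
  | nil => simp [PySem.Chars.join, List.intercalate]
  | cons p ps ih =>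
    cases ps with
    | nil => simp [PySem.Chars.join, List.intercalate]
    | cons q qs =>
      simp [PySem.Chars.join, List.intercalate] at *
      simpa using ih

theorem enumJ (r : Int) (hr : r = 0 ∨ r = 1) (ps : List (List Char)) : ∀ (n : Int), 0 ≤ n →
    (((PySem.List.enumerate ps n).filter (fun p => p.1 % 2 == r)).map Prod.snd).flatten
      = pvJ (n % 2 == r) ps := by
  induction ps with
  | nil => intro n hn; simp [PySem.List.enumerate_nil, pvJ]
  | cons p ps ih =>
    intro n hn
    rw [PySem.List.enumerate_cons, List.filter_cons]
    by_cases h : n % 2 = r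
    · rw [if_pos (by simp [h]), List.map_cons, List.flatten_cons, ih (n + 1) (by omega),
         show (((n + 1) % 2 : Int) == r) = false by simp; omega,
         show ((n % 2 : Int) == r) = true by simp [h]]
      simp [pvJ]
    · rw [if_neg (by simp [h]), ih (n + 1) (by omega),
         show (((n + 1) % 2 : Int) == r) = true by simp; omega,
         show ((n % 2 : Int) == r) = false by simp [h]]
      simp [pvJ]

theorem alt_eq (b x : Bool) : (if b then x else false) = (b && x) := by cases b <;> simp

theorem matchShape (o1 o2 : Option Int) (alt : Bool) (targ : List Char) :
    (match o1, o2 with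
     | some a, some b => (a, b, alt, String.ofList targ)
     | _, _ => ((0 : Int), (0 : Int), false, ("" : String)) : Int × Int × Bool × String)
    = (match o1 with
       | none => ((0 : Int), (0 : Int), false, ("" : String))
       | some a =>
         match o2 with
         | none => ((0 : Int), (0 : Int), false, ("" : String))
         | some b => (a, b, alt, String.ofList targ)) := by
  cases o1 <;> cases o2 <;> rfl

-- ===== VERDICT (by name: the statement is the Claim_ definition above) =====
theorem fetchct_spec : Claim_equal_fetchct := by
  unfold Claim_equal_fetchct Spec_fetchct
  intro txt _ _
  unfold fetchct fetchct_alt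
  by_cases h : (PySem.Chars.isIn ['['] (PySem.Str.strip txt).toList
      && PySem.Chars.isIn [']'] (PySem.Str.strip txt).toList) = true
  · simp only [h, if_true, loop_eq, List.nil_append, replace_eq, splitOn_eq, pvJoinNil]
    rw [enumJ 0 (Or.inl rfl) _ 0 le_rfl, enumJ 1 (Or.inr rfl) _ 0 le_rfl,
        show (((0 : Int) % 2 : Int) == (0 : Int)) = true from rfl,
        show (((0 : Int) % 2 : Int) == (1 : Int)) = false from rfl]
    rcases innerOuter_eq (PySem.Str.strip txt).toList false with ⟨hi, ho⟩
    rw [hi, ho, alt_eq]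
    simp only [Bool.not_false]
    rw [matchShape]
  · rw [if_neg h, if_neg h]
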